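-- pv_equiv track=rewrite | github.com/hellcatjack/LeanQuantHub | backend/app/services/trade_executor.py | determine_run_status
-- ===== SOURCE A (Python) =====
-- _TERMINAL_ORDER_STATUSES = {"FILLED", "CANCELED", "CANCELLED", "REJECTED", "INVALID", "SKIPPED"}
--
-- _CANCELLED_ORDER_STATUSES = {"CANCELED", "CANCELLED"}
--
-- _REJECTED_ORDER_STATUSES = {"REJECTED", "INVALID"}
--
-- _SKIPPED_ORDER_STATUSES = {"SKIPPED"}
--
-- def _normalize_order_status(value: str | None) -> str:
--     return str(value or "").strip().upper()
--
-- def determine_run_status(order_statuses: list[str]) -> tuple[str | None, dict[str, int]]: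
--     normalized = [_normalize_order_status(status) for status in order_statuses if status is not None]
--     total = len(normalized)
--     summary = {"total": total, "filled": 0, "cancelled": 0, "rejected": 0, "skipped": 0}
--     if not normalized:
--         return None, summary
--     if any(status not in _TERMINAL_ORDER_STATUSES for status in normalized):
--         for status in normalized:
--             if status == "FILLED":
--                 summary["filled"] += 1
--             elif status in _CANCELLED_ORDER_STATUSES:
--                 summary["cancelled"] += 1
--             elif status in _REJECTED_ORDER_STATUSES:
--                 summary["rejected"] += 1
--             elif status in _SKIPPED_ORDER_STATUSES:
--                 summary["skipped"] += 1
--         return None, summary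
--     for status in normalized:
--         if status == "FILLED":
--             summary["filled"] += 1
--         elif status in _CANCELLED_ORDER_STATUSES:
--             summary["cancelled"] += 1
--         elif status in _REJECTED_ORDER_STATUSES:
--             summary["rejected"] += 1
--         elif status in _SKIPPED_ORDER_STATUSES:
--             summary["skipped"] += 1
--     if summary["filled"] == 0 and (summary["rejected"] + summary["cancelled"] + summary["skipped"]) > 0:
--         return "failed", summary
--     if summary["rejected"] > 0 or summary["cancelled"] > 0 or summary["skipped"] > 0:
--         return "partial", summary
--     return "done", summary
-- ===== SOURCE B (Python) =====
-- _CANCELLED_ORDER_STATUSES = {"CANCELED", "CANCELLED"}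
-- _REJECTED_ORDER_STATUSES = {"REJECTED", "INVALID"}
--
--
-- def determine_run_status(order_statuses):
--     # One counting pass; "all statuses terminal" becomes the arithmetic fact
--     # filled + cancelled + rejected + skipped == total, replacing A's any() pre-scan
--     # and duplicated loop.
--     total = filled = cancelled = rejected = skipped = 0
--     for status in order_statuses:
--         if status is None:
--             continue
--         s = str(status or "").strip().upper()
--         total += 1
--         if s == "FILLED":
--             filled += 1
--         elif s in _CANCELLED_ORDER_STATUSES:
--             cancelled += 1
--         elif s in _REJECTED_ORDER_STATUSES:
--             rejected += 1
--         elif s == "SKIPPED":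
--             skipped += 1
--     summary = {"total": total, "filled": filled, "cancelled": cancelled,
--                "rejected": rejected, "skipped": skipped}
--     if total == 0 or filled + cancelled + rejected + skipped != total:
--         return None, summary
--     if filled == 0:
--         return "failed", summary
--     if cancelled or rejected or skipped:
--         return "partial", summary
--     return "done", summary
-- ===== Notes on version B (the rewrite author's own statement) =====
-- stated objective: simpler
-- what changed: A's any() terminal pre-scan plus a duplicated counting loop are replaced by a single counting pass; 'all statuses terminal' is decided arithmetically by filled+cancelled+rejected+skipped == total.
import Mathlib
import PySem

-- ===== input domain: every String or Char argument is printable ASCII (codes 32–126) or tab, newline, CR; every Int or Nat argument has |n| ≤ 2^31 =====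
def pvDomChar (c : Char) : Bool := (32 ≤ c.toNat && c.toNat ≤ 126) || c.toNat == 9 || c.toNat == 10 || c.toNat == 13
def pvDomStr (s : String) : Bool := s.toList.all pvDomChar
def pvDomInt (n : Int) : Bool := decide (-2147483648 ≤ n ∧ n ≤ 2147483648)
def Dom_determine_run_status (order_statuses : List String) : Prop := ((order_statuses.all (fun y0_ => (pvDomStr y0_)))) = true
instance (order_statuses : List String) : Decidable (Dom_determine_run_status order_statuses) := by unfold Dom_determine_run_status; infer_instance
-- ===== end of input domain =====

-- B replaces A's any() pre-scan + duplicated counting loop by one counting pass and the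
-- arithmetic test filled+cancelled+rejected+skipped == total for "all statuses terminal" (objective: simpler).

-- ===== PORT A =====

def pvTerminalA : List String := ["FILLED", "CANCELED", "CANCELLED", "REJECTED", "INVALID", "SKIPPED"]

-- _normalize_order_status: str(value or "") is value itself for a string ("" stays "")
def pvNormalizeA (value : String) : String :=
  PySem.Str.upper (PySem.Str.strip (if value = "" then "" else value))

-- the counting loop A's source writes out twice (both occurrences are this loop verbatim)
def pvCountLoopA (summary : PySem.Dict String Int) (normalized : List String) : PySem.Dict String Int :=
  normalized.foldl (fun d status =>
    if status = "FILLED" then d.insert "filled" (d.getD "filled" 0 + 1)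
    else if status ∈ ["CANCELED", "CANCELLED"] then d.insert "cancelled" (d.getD "cancelled" 0 + 1)
    else if status ∈ ["REJECTED", "INVALID"] then d.insert "rejected" (d.getD "rejected" 0 + 1)
    else if status ∈ ["SKIPPED"] then d.insert "skipped" (d.getD "skipped" 0 + 1)
    else d) summary

def determine_run_status (order_statuses : List String) : Option String × (List (String × Int)) :=
  let normalized := order_statuses.map pvNormalizeA
  let total : Int := normalized.length
  let summary : PySem.Dict String Int :=
    (((((PySem.Dict.empty.insert "total" total).insert "filled" 0).insert "cancelled" 0).insert "rejected" 0).insert "skipped" 0)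
  if normalized = [] then (none, summary.items)
  else if normalized.any (fun status => !(pvTerminalA.contains status)) then
    let summary := pvCountLoopA summary normalized
    (none, summary.items)
  else
    let summary := pvCountLoopA summary normalized
    if summary.getD "filled" 0 = 0 ∧ summary.getD "rejected" 0 + summary.getD "cancelled" 0 + summary.getD "skipped" 0 > 0 then
      (some "failed", summary.items)
    else if summary.getD "rejected" 0 > 0 ∨ summary.getD "cancelled" 0 > 0 ∨ summary.getD "skipped" 0 > 0 then
      (some "partial", summary.items)
    else
      (some "done", summary.items)

-- ===== PORT B =====

-- Source B's single counting pass: state (total, filled, cancelled, rejected, skipped)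
def pvStepB (acc : Int × Int × Int × Int × Int) (status : String) : Int × Int × Int × Int × Int :=
  let s := PySem.Str.upper (PySem.Str.strip status)
  let (total, filled, cancelled, rejected, skipped) := acc
  let total := total + 1
  if s = "FILLED" then (total, filled + 1, cancelled, rejected, skipped)
  else if s = "CANCELED" ∨ s = "CANCELLED" then (total, filled, cancelled + 1, rejected, skipped)
  else if s = "REJECTED" ∨ s = "INVALID" then (total, filled, cancelled, rejected + 1, skipped)
  else if s = "SKIPPED" then (total, filled, cancelled, rejected, skipped + 1)
  else (total, filled, cancelled, rejected, skipped)

def pvCountsB (order_statuses : List String) : Int × Int × Int × Int × Int :=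
  order_statuses.foldl pvStepB (0, 0, 0, 0, 0)

def determine_run_status_alt (order_statuses : List String) : Option String × (List (String × Int)) :=
  let (total, filled, cancelled, rejected, skipped) := pvCountsB order_statuses
  let summary : List (String × Int) :=
    [("total", total), ("filled", filled), ("cancelled", cancelled), ("rejected", rejected), ("skipped", skipped)]
  if total = 0 ∨ filled + cancelled + rejected + skipped ≠ total then (none, summary)
  else if filled = 0 then (some "failed", summary)
  else if cancelled ≠ 0 ∨ rejected ≠ 0 ∨ skipped ≠ 0 then (some "partial", summary)
  else (some "done", summary)

-- ===== PRECONDITION & SPEC =====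
def Spec_determine_run_status (order_statuses : List String) (out : Option String × (List (String × Int))) : Prop := out = determine_run_status_alt order_statuses
instance (order_statuses : List String) (out : Option String × (List (String × Int))) : Decidable (Spec_determine_run_status order_statuses out) := by unfold Spec_determine_run_status; infer_instance

-- ===== CLAIM (what is proved, stated in full; the proofs are below) =====
def Claim_equal_determine_run_status : Prop := ∀ (order_statuses : List String), Dom_determine_run_status order_statuses → Spec_determine_run_status order_statuses (determine_run_status order_statuses)

-- ===== LEMMAS AND PROOFS =====

-- the fixed-key summary dict with the five counters as parameters
def pvMkSummary (t f c r k : Int) : PySem.Dict String Int :=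
  PySem.Dict.mk [("total", t), ("filled", f), ("cancelled", c), ("rejected", r), ("skipped", k)]

-- per-category counters on the normalized list
def pvCntF (l : List String) : Nat := l.countP (fun s => pvNormalizeA s = "FILLED")
def pvCntC (l : List String) : Nat := l.countP (fun s => pvNormalizeA s = "CANCELED" ∨ pvNormalizeA s = "CANCELLED")
def pvCntR (l : List String) : Nat := l.countP (fun s => pvNormalizeA s = "REJECTED" ∨ pvNormalizeA s = "INVALID")
def pvCntK (l : List String) : Nat := l.countP (fun s => pvNormalizeA s = "SKIPPED")

theorem pvNormalizeA_eq (s : String) :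
    pvNormalizeA s = PySem.Str.upper (PySem.Str.strip s) := by
  unfold pvNormalizeA; split <;> simp_all

theorem pvMk_insert_filled (t f c r k v : Int) :
    (pvMkSummary t f c r k).insert "filled" v = pvMkSummary t v c r k := rfl

theorem pvMk_insert_cancelled (t f c r k v : Int) :
    (pvMkSummary t f c r k).insert "cancelled" v = pvMkSummary t f v r k := rfl

theorem pvMk_insert_rejected (t f c r k v : Int) :
    (pvMkSummary t f c r k).insert "rejected" v = pvMkSummary t f c v k := rfl

theorem pvMk_insert_skipped (t f c r k v : Int) :
    (pvMkSummary t f c r k).insert "skipped" v = pvMkSummary t f c r v := rfl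

theorem pvMk_getD_filled (t f c r k : Int) : (pvMkSummary t f c r k).getD "filled" 0 = f := rfl
theorem pvMk_getD_cancelled (t f c r k : Int) : (pvMkSummary t f c r k).getD "cancelled" 0 = c := rfl
theorem pvMk_getD_rejected (t f c r k : Int) : (pvMkSummary t f c r k).getD "rejected" 0 = r := rfl
theorem pvMk_getD_skipped (t f c r k : Int) : (pvMkSummary t f c r k).getD "skipped" 0 = k := rfl

theorem pvMk_items (t f c r k : Int) :
    (pvMkSummary t f c r k).items
      = [("total", t), ("filled", f), ("cancelled", c), ("rejected", r), ("skipped", k)] := rfl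

theorem pvMk_inj (t f c r k t' f' c' r' k' : Int) :
    pvMkSummary t f c r k = pvMkSummary t' f' c' r' k' ↔
      (t = t' ∧ f = f' ∧ c = c' ∧ r = r' ∧ k = k') := by
  simp [pvMkSummary, PySem.Dict.mk.injEq]

theorem pvCountsB_fold (l : List String) : ∀ t f c r k : Int,
    l.foldl pvStepB (t, f, c, r, k)
      = (t + l.length, f + pvCntF l, c + pvCntC l, r + pvCntR l, k + pvCntK l) := by
  induction l with
  | nil => intro t f c r k; simp [pvCntF, pvCntC, pvCntR, pvCntK]
  | cons a l ih =>
    intro t f c r k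
    rw [List.foldl_cons]
    by_cases hF : PySem.Str.upper (PySem.Str.strip a) = "FILLED"
    · simp only [pvStepB, ih, pvCntF, pvCntC, pvCntR, pvCntK,
        List.countP_cons, pvNormalizeA_eq]
      simp [hF, Prod.ext_iff]; omega
    · by_cases hC : PySem.Str.upper (PySem.Str.strip a) = "CANCELED" ∨
          PySem.Str.upper (PySem.Str.strip a) = "CANCELLED"
      · simp only [pvStepB, ih, pvCntF, pvCntC, pvCntR, pvCntK, List.countP_cons, pvNormalizeA_eq]
        rcases hC with hC | hC <;>
          simp [hC, Prod.ext_iff] <;> push_cast <;> omega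
      · by_cases hR : PySem.Str.upper (PySem.Str.strip a) = "REJECTED" ∨
            PySem.Str.upper (PySem.Str.strip a) = "INVALID"
        · simp only [pvStepB, ih, pvCntF, pvCntC, pvCntR, pvCntK, List.countP_cons, pvNormalizeA_eq]
          rcases hR with hR | hR <;>
            simp [hR, Prod.ext_iff] <;> push_cast <;> omega
        · by_cases hK : PySem.Str.upper (PySem.Str.strip a) = "SKIPPED"
          · simp only [pvStepB, ih, pvCntF, pvCntC, pvCntR, pvCntK, List.countP_cons, pvNormalizeA_eq]
            simp [hK, Prod.ext_iff]; push_cast; omega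
          · simp only [pvStepB, ih, pvCntF, pvCntC, pvCntR, pvCntK, List.countP_cons, pvNormalizeA_eq]
            simp [hF, hC, hR, hK, Prod.ext_iff]; push_cast; omega

theorem pvCountsB_spec (l : List String) :
    pvCountsB l = ((l.length : Int), (pvCntF l : Int), (pvCntC l : Int), (pvCntR l : Int), (pvCntK l : Int)) := by
  unfold pvCountsB
  rw [pvCountsB_fold]
  simp

theorem pvCountLoopA_spec (l : List String) : ∀ t f c r k : Int,
    pvCountLoopA (pvMkSummary t f c r k) (l.map pvNormalizeA)
      = pvMkSummary t (f + pvCntF l) (c + pvCntC l) (r + pvCntR l) (k + pvCntK l) := by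
  induction l with
  | nil => intro t f c r k; simp [pvCountLoopA, pvCntF, pvCntC, pvCntR, pvCntK]
  | cons a l ih =>
    intro t f c r k
    simp only [List.map_cons]
    unfold pvCountLoopA
    rw [List.foldl_cons]
    show pvCountLoopA _ (l.map pvNormalizeA) = _
    by_cases hF : PySem.Str.upper (PySem.Str.strip a) = "FILLED"
    · have hn : pvNormalizeA a = "FILLED" := (pvNormalizeA_eq a).trans hF
      rw [if_pos hn, pvMk_getD_filled, pvMk_insert_filled, ih]
      simp only [pvCntF, pvCntC, pvCntR, pvCntK, List.countP_cons, pvNormalizeA_eq]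
      simp [hF, pvMk_inj] <;> push_cast <;> omega
    · by_cases hC : PySem.Str.upper (PySem.Str.strip a) = "CANCELED" ∨
          PySem.Str.upper (PySem.Str.strip a) = "CANCELLED"
      · have hna : pvNormalizeA a = "CANCELED" ∨ pvNormalizeA a = "CANCELLED" := by
          rw [pvNormalizeA_eq]; exact hC
        have hmem : pvNormalizeA a ∈ ["CANCELED", "CANCELLED"] := by
          rcases hna with h | h <;> simp [h]
        have hne : ¬ pvNormalizeA a = "FILLED" := by rw [pvNormalizeA_eq]; exact hF
        rw [if_neg hne, if_pos hmem]
        simp only [pvMk_getD_cancelled, pvMk_insert_cancelled, ih, pvCntF, pvCntC, pvCntR,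
          pvCntK, List.countP_cons, pvNormalizeA_eq]
        rcases hC with h | h <;> simp [h, pvMk_inj] <;> push_cast <;> omega
      · by_cases hR : PySem.Str.upper (PySem.Str.strip a) = "REJECTED" ∨
            PySem.Str.upper (PySem.Str.strip a) = "INVALID"
        · have hna : pvNormalizeA a = "REJECTED" ∨ pvNormalizeA a = "INVALID" := by
            rw [pvNormalizeA_eq]; exact hR
          have hmem : pvNormalizeA a ∈ ["REJECTED", "INVALID"] := by
            rcases hna with h | h <;> simp [h]
          have hne1 : ¬ pvNormalizeA a = "FILLED" := by rw [pvNormalizeA_eq]; exact hF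
          have hne2 : ¬ pvNormalizeA a ∈ ["CANCELED", "CANCELLED"] := by
            simp only [List.mem_cons, List.not_mem_nil, or_false, pvNormalizeA_eq]; exact hC
          rw [if_neg hne1, if_neg hne2, if_pos hmem]
          simp only [pvMk_getD_rejected, pvMk_insert_rejected, ih, pvCntF, pvCntC, pvCntR,
            pvCntK, List.countP_cons, pvNormalizeA_eq]
          rcases hR with h | h <;> simp [h, pvMk_inj] <;> push_cast <;> omega
        · by_cases hK : PySem.Str.upper (PySem.Str.strip a) = "SKIPPED"
          · have hmem : pvNormalizeA a ∈ ["SKIPPED"] := by simp [pvNormalizeA_eq, hK]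
            have hne1 : ¬ pvNormalizeA a = "FILLED" := by rw [pvNormalizeA_eq]; exact hF
            have hne2 : ¬ pvNormalizeA a ∈ ["CANCELED", "CANCELLED"] := by
              simp only [List.mem_cons, List.not_mem_nil, or_false, pvNormalizeA_eq]; exact hC
            have hne3 : ¬ pvNormalizeA a ∈ ["REJECTED", "INVALID"] := by
              simp only [List.mem_cons, List.not_mem_nil, or_false, pvNormalizeA_eq]; exact hR
            rw [if_neg hne1, if_neg hne2, if_neg hne3, if_pos hmem]
            simp only [pvMk_getD_skipped, pvMk_insert_skipped, ih, pvCntF, pvCntC, pvCntR,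
              pvCntK, List.countP_cons, pvNormalizeA_eq]
            simp [hK, pvMk_inj]; push_cast; omega
          · have hne1 : ¬ pvNormalizeA a = "FILLED" := by rw [pvNormalizeA_eq]; exact hF
            have hne2 : ¬ pvNormalizeA a ∈ ["CANCELED", "CANCELLED"] := by
              simp only [List.mem_cons, List.not_mem_nil, or_false, pvNormalizeA_eq]; exact hC
            have hne3 : ¬ pvNormalizeA a ∈ ["REJECTED", "INVALID"] := by
              simp only [List.mem_cons, List.not_mem_nil, or_false, pvNormalizeA_eq]; exact hR
            have hne4 : ¬ pvNormalizeA a ∈ ["SKIPPED"] := by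
              simp only [List.mem_cons, List.not_mem_nil, or_false, pvNormalizeA_eq]; exact hK
            rw [if_neg hne1, if_neg hne2, if_neg hne3, if_neg hne4]
            simp only [ih, pvCntF, pvCntC, pvCntR, pvCntK, List.countP_cons, pvNormalizeA_eq]
            simp [hF, hC, hR, hK]

theorem pvSum_le (l : List String) :
    pvCntF l + pvCntC l + pvCntR l + pvCntK l ≤ l.length := by
  induction l with
  | nil => simp [pvCntF, pvCntC, pvCntR, pvCntK]
  | cons a l ih =>
    simp only [pvCntF, pvCntC, pvCntR, pvCntK, List.countP_cons, List.length_cons,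
      pvNormalizeA_eq] at *
    by_cases hF : PySem.Str.upper (PySem.Str.strip a) = "FILLED" <;>
    by_cases hC : PySem.Str.upper (PySem.Str.strip a) = "CANCELED" ∨
        PySem.Str.upper (PySem.Str.strip a) = "CANCELLED" <;>
    by_cases hR : PySem.Str.upper (PySem.Str.strip a) = "REJECTED" ∨
        PySem.Str.upper (PySem.Str.strip a) = "INVALID" <;>
    by_cases hK : PySem.Str.upper (PySem.Str.strip a) = "SKIPPED" <;>
      first
        | (rcases hC with h | h <;> simp_all <;> omega)
        | (simp_all <;> omega)

theorem pvTerminal_iff (l : List String) :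
    ((l.map pvNormalizeA).any (fun status => !(pvTerminalA.contains status)) = false)
      ↔ pvCntF l + pvCntC l + pvCntR l + pvCntK l = l.length := by
  induction l with
  | nil => simp [pvCntF, pvCntC, pvCntR, pvCntK]
  | cons a l ih =>
    have hle := pvSum_le l
    simp only [List.map_cons, List.any_cons, Bool.or_eq_false_iff, Bool.not_eq_false',
      pvCntF, pvCntC, pvCntR, pvCntK, List.countP_cons, List.length_cons, pvNormalizeA_eq,
      pvTerminalA] at *
    by_cases hF : PySem.Str.upper (PySem.Str.strip a) = "FILLED" <;>
    by_cases hC : PySem.Str.upper (PySem.Str.strip a) = "CANCELED" ∨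
        PySem.Str.upper (PySem.Str.strip a) = "CANCELLED" <;>
    by_cases hR : PySem.Str.upper (PySem.Str.strip a) = "REJECTED" ∨
        PySem.Str.upper (PySem.Str.strip a) = "INVALID" <;>
    by_cases hK : PySem.Str.upper (PySem.Str.strip a) = "SKIPPED" <;>
      first
        | (rcases hC with h | h <;> simp_all <;> omega)
        | (rcases hR with h | h <;> simp_all <;> omega)
        | (simp_all <;> omega)

-- ===== VERDICT (by name: the statement is the Claim_ definition above) =====
theorem determine_run_status_spec : Claim_equal_determine_run_status := by
  intro l _
  show determine_run_status l = determine_run_status_alt l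
  by_cases hnil : l = []
  · subst hnil; rfl
  · have hlen : 0 < l.length := List.length_pos_of_ne_nil hnil
    have hinit : ∀ t : Int,
        (((((PySem.Dict.empty.insert "total" t).insert "filled" 0).insert "cancelled" 0).insert
          "rejected" 0).insert "skipped" 0) = pvMkSummary t 0 0 0 0 := fun _ => rfl
    simp only [determine_run_status, determine_run_status_alt, pvCountsB_spec, hinit,
      List.length_map, List.map_eq_nil_iff, hnil, if_false]
    by_cases hany :
        (l.map pvNormalizeA).any (fun status => !(pvTerminalA.contains status)) = true
    · have hsum : pvCntF l + pvCntC l + pvCntR l + pvCntK l ≠ l.length := by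
        intro h
        rw [← pvTerminal_iff] at h
        rw [h] at hany
        exact Bool.false_ne_true hany
      rw [if_pos hany, pvCountLoopA_spec]
      have hcond : ((l.length : Int) = 0 ∨
          (pvCntF l : Int) + (pvCntC l : Int) + (pvCntR l : Int) + (pvCntK l : Int) ≠ (l.length : Int)) := by
        right; push_cast; omega
      rw [if_pos hcond]
      simp [pvMk_items]
    · have hfalse : (l.map pvNormalizeA).any (fun status => !(pvTerminalA.contains status)) = false := by
        simpa using hany
      have hsum : pvCntF l + pvCntC l + pvCntR l + pvCntK l = l.length :=
        (pvTerminal_iff l).mp hfalse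
      rw [if_neg hany, pvCountLoopA_spec]
      have hcond : ¬ ((l.length : Int) = 0 ∨
          (pvCntF l : Int) + (pvCntC l : Int) + (pvCntR l : Int) + (pvCntK l : Int) ≠ (l.length : Int)) := by
        refine not_or.mpr ⟨?_, ?_⟩ <;> push_cast <;> omega
      rw [if_neg hcond]
      simp only [pvMk_getD_filled, pvMk_getD_cancelled, pvMk_getD_rejected, pvMk_getD_skipped,
        zero_add, pvMk_items]
      split_ifs with h1 h2 h3 h4 h5 <;> first | rfl | (exfalso; omega)
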